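-- pv_equiv track=rewrite | github.com/samuelmohr/adventofcode2023 | day14/solve.py | tilt_row
-- ===== SOURCE A (Python) =====
-- def tilt_row(row: str) -> str:
--     s = []
--     spaces = 0
--     for i in range(len(row)):
--         if row[i] == ".":
--             spaces += 1
--         elif row[i] == "O":
--             s.append("O")
--         elif row[i] == "#":
--             s.extend(["." for _ in range(spaces)])
--             s.append("#")
--             spaces = 0
--     s.extend(["." for _ in range(spaces)])
--     return "".join(s)
-- ===== SOURCE B (Python) =====
-- def tilt_row(row: str) -> str:
--     return "#".join(
--         "O" * seg.count("O") + "." * seg.count(".")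
--         for seg in row.split("#")
--     )
-- ===== Notes on version B (the rewrite author's own statement) =====
-- stated objective: simpler
-- what changed: Replaces A's character-by-character state machine (pending-space counter, incremental list building) with a split on '#' into segments, rebuilding each segment from its 'O' and '.' counts and rejoining with '#'.
import Mathlib
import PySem

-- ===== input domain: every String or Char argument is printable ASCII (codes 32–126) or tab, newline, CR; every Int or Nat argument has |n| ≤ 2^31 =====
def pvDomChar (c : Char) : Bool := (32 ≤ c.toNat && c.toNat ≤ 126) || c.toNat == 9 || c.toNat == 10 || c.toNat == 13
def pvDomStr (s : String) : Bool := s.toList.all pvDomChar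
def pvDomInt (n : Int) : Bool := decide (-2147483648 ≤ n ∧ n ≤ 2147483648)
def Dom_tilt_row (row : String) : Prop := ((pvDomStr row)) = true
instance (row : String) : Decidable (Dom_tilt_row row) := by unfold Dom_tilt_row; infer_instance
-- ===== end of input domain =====

-- B replaces A's incremental pending-spaces state machine by split-on-'#', count-and-rebuild
-- each segment, rejoin with '#'; same result, a simpler decomposition.

-- ===== PORT A =====
-- the body of A's for-loop, over state (s : list of pieces, spaces : pending-dot counter)
def stepA (st : List String × Nat) (c : Char) : List String × Nat :=
  if c = '.' then (st.1, st.2 + 1)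
  else if c = 'O' then (st.1 ++ ["O"], st.2)
  else if c = '#' then (st.1 ++ List.replicate st.2 "." ++ ["#"], 0)
  else st

-- literal transliteration of A: loop over the characters in order, final extend, "".join(s)
def tilt_row (row : String) : String :=
  let st := row.toList.foldl stepA ([], 0)
  PySem.Str.join "" (st.1 ++ List.replicate st.2 ".")

-- ===== PORT B =====
-- literal transliteration of Source B: row.split("#") (sep "#" ≠ "", so split? is always `some`),
-- each segment rebuilt as "O"*count + "."*count ('c'*n ported as ofList (replicate n c),
-- '+' of the two runs as list append), then "#".join(...).
def tilt_row_alt (row : String) : String :=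
  let parts := (PySem.Str.split? row "#").getD []
  PySem.Str.join "#" (parts.map (fun seg =>
    String.ofList (List.replicate (PySem.Str.count seg "O") 'O'
                   ++ List.replicate (PySem.Str.count seg ".") '.')))

-- ===== PRECONDITION & SPEC =====
def Spec_tilt_row (row : String) (out : String) : Prop := out = tilt_row_alt row
instance (row : String) (out : String) : Decidable (Spec_tilt_row row out) := by unfold Spec_tilt_row; infer_instance

-- ===== CLAIM (what is proved, stated in full; the proofs are below) =====
def Claim_equal_tilt_row : Prop := ∀ (row : String), Dom_tilt_row row → Spec_tilt_row row (tilt_row row)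

-- ===== LEMMAS AND PROOFS =====

-- functional characterisation of Python's split on the single-char separator '#'
def mySplit (pre : List Char) : List Char → List (List Char)
  | [] => [pre]
  | c :: cs => if c = '#' then pre :: mySplit [] cs else mySplit (pre ++ [c]) cs

-- one rebuilt segment, at the char level
def tiltSeg (seg : List Char) : List Char :=
  List.replicate (seg.count 'O') 'O' ++ List.replicate (seg.count '.') '.'

-- midpoint: A's loop as a structural recursion over the remaining characters
def fmid (spaces : Nat) : List Char → List Char
  | [] => List.replicate spaces '.'
  | c :: cs =>
    if c = '.' then fmid (spaces + 1) cs
    else if c = 'O' then 'O' :: fmid spaces cs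
    else if c = '#' then List.replicate spaces '.' ++ '#' :: fmid 0 cs
    else fmid spaces cs

theorem splitOn_go_spec (l : List Char) : ∀ (cur : List Char) (acc : List (List Char)) (fuel : Nat),
    l.length < fuel →
    PySem.Chars.splitOn.go ['#'] fuel l cur acc = acc.reverse ++ mySplit cur.reverse l := by
  induction l with
  | nil =>
    intro cur acc fuel h
    match fuel with
    | fuel + 1 => rw [PySem.Chars.splitOn.go.eq_def]; simp [mySplit]
  | cons c cs ih =>
    intro cur acc fuel h
    match fuel with
    | fuel + 1 =>
      rw [PySem.Chars.splitOn.go.eq_def]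
      simp only [List.isPrefixOf, Bool.and_true, List.length_cons, List.length_nil,
        List.drop_succ_cons, List.drop_zero]
      by_cases hc : c = '#'
      · subst hc
        rw [if_pos (by simp)]
        rw [ih [] (cur.reverse :: acc) fuel (by simp at h ⊢; omega)]
        simp [mySplit]
      · rw [if_neg (by simp; exact fun hx => (hc hx.symm).elim)]
        rw [ih (c :: cur) acc fuel (by simp at h ⊢; omega)]
        simp [mySplit, hc]

theorem splitOn_hash (cs : List Char) : PySem.Chars.splitOn cs ['#'] = mySplit [] cs := by
  unfold PySem.Chars.splitOn
  rw [splitOn_go_spec cs [] [] (cs.length + 1) (by omega)]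
  simp

theorem count_go_spec (v : Char) (l : List Char) : ∀ (acc fuel : Nat), l.length ≤ fuel →
    PySem.Chars.count.go [v] fuel l acc = acc + l.count v := by
  induction l with
  | nil =>
    intro acc fuel h
    match fuel with
    | 0 => rw [PySem.Chars.count.go.eq_def]; simp
    | fuel + 1 => rw [PySem.Chars.count.go.eq_def]; simp
  | cons c cs ih =>
    intro acc fuel h
    match fuel with
    | fuel + 1 =>
      rw [PySem.Chars.count.go.eq_def]
      simp only [List.isPrefixOf, Bool.and_true, List.length_cons, List.length_nil,
        List.drop_succ_cons, List.drop_zero]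
      by_cases hc : c = v
      · subst hc
        rw [if_pos (by simp)]
        rw [ih (acc + 1) fuel (by simp at h ⊢; omega)]
        simp
        omega
      · rw [if_neg (by simp; exact fun hx => (hc hx.symm).elim)]
        rw [ih acc fuel (by simp at h ⊢; omega)]
        have hb : (c == v) = false := by simpa using hc
        simp [List.count_cons, hb]

theorem count_single (v : Char) (cs : List Char) : PySem.Chars.count cs [v] = cs.count v := by
  unfold PySem.Chars.count
  rw [if_neg (by simp), count_go_spec v cs 0 cs.length le_rfl]
  omega

theorem mySplit_ne_nil (pre : List Char) (cs : List Char) : mySplit pre cs ≠ [] := by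
  induction cs generalizing pre with
  | nil => simp [mySplit]
  | cons c cs ih =>
    simp only [mySplit]
    split_ifs
    · simp
    · exact ih _

theorem join_hash_mySplit (cs : List Char) : ∀ (pre : List Char),
    PySem.Chars.join ['#'] ((mySplit pre cs).map tiltSeg)
      = List.replicate (pre.count 'O') 'O' ++ fmid (pre.count '.') cs := by
  induction cs with
  | nil =>
    intro pre
    simp [mySplit, fmid, tiltSeg, PySem.Chars.join_singleton]
  | cons c cs ih =>
    intro pre
    by_cases hd : c = '.'
    · rw [hd]
      simp only [mySplit, fmid]
      simp only [if_neg (show ¬ ('.' : Char) = '#' by decide), if_true]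
      rw [ih (pre ++ ['.'])]
      simp [List.count_append]
    · by_cases ho : c = 'O'
      · rw [ho]
        simp only [mySplit, fmid]
        simp only [if_neg (show ¬ ('O' : Char) = '#' by decide),
          if_neg (show ¬ ('O' : Char) = '.' by decide), if_true]
        rw [ih (pre ++ ['O'])]
        simp [List.count_append, List.replicate_succ']
      · by_cases hh : c = '#'
        · rw [hh]
          simp only [mySplit, fmid]
          simp only [if_neg (show ¬ ('#' : Char) = '.' by decide),
            if_neg (show ¬ ('#' : Char) = 'O' by decide), if_true]
          obtain ⟨b, r, hbr⟩ := List.exists_cons_of_ne_nil (mySplit_ne_nil [] cs)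
          have hjoin : PySem.Chars.join ['#'] ((mySplit [] cs).map tiltSeg)
              = fmid 0 cs := by simpa using ih []
          rw [hbr, List.map_cons, List.map_cons, PySem.Chars.join_cons_cons,
            ← List.map_cons, ← hbr, hjoin]
          simp [tiltSeg]
        · simp only [mySplit, fmid]
          rw [if_neg hh, if_neg hd, if_neg ho, if_neg hh]
          rw [ih (pre ++ [c])]
          simp [List.count_append, hd, ho]

theorem join_nil_eq_flatten (l : List (List Char)) : PySem.Chars.join [] l = l.flatten := by
  match l with
  | [] => simp [PySem.Chars.join_nil]
  | [p] => simp [PySem.Chars.join_singleton]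
  | p :: q :: r =>
    rw [PySem.Chars.join_cons_cons, join_nil_eq_flatten (q :: r)]
    simp

theorem foldA (cs : List Char) : ∀ (s : List String) (sp : Nat),
    (List.map String.toList ((cs.foldl stepA (s, sp)).1
        ++ List.replicate (cs.foldl stepA (s, sp)).2 ".")).flatten
      = (List.map String.toList s).flatten ++ fmid sp cs := by
  induction cs with
  | nil =>
    intro s sp
    simp [fmid]
  | cons c cs ih =>
    intro s sp
    by_cases hd : c = '.'
    · rw [hd, List.foldl_cons, show stepA (s, sp) '.' = (s, sp + 1) by simp [stepA],
        show fmid sp ('.' :: cs) = fmid (sp + 1) cs by simp [fmid]]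
      exact ih s (sp + 1)
    · by_cases ho : c = 'O'
      · rw [ho, List.foldl_cons, show stepA (s, sp) 'O' = (s ++ ["O"], sp) by simp [stepA],
          show fmid sp ('O' :: cs) = 'O' :: fmid sp cs by simp [fmid]]
        rw [ih (s ++ ["O"]) sp]
        simp [show ("O" : String).toList = ['O'] by decide]
      · by_cases hh : c = '#'
        · rw [hh, List.foldl_cons,
            show stepA (s, sp) '#' = (s ++ List.replicate sp "." ++ ["#"], 0) by simp [stepA],
            show fmid sp ('#' :: cs) = List.replicate sp '.' ++ '#' :: fmid 0 cs by simp [fmid]]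
          rw [ih (s ++ List.replicate sp "." ++ ["#"]) 0]
          simp [show ("#" : String).toList = ['#'] by decide]
        · rw [List.foldl_cons, show stepA (s, sp) c = (s, sp) by simp [stepA, hd, ho, hh],
            show fmid sp (c :: cs) = fmid sp cs by simp [fmid, hd, ho, hh]]
          exact ih s sp

-- ===== VERDICT (by name: the statement is the Claim_ definition above) =====
theorem tilt_row_spec : Claim_equal_tilt_row := by
  intro row _
  unfold Spec_tilt_row
  apply String.toList_inj.mp
  -- A side
  simp only [tilt_row, PySem.Str.join, String.toList_ofList]
  rw [show ("" : String).toList = [] from rfl, join_nil_eq_flatten, foldA row.toList [] 0]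
  -- B side
  simp only [tilt_row_alt, PySem.Str.split?, PySem.Chars.split?,
    show ("#" : String).toList = ['#'] from rfl]
  rw [if_neg (by simp), splitOn_hash]
  simp only [Option.map_some, Option.getD_some, PySem.Str.join, String.toList_ofList,
    List.map_map, show ("#" : String).toList = ['#'] from rfl]
  have hcomp : String.toList ∘ (fun seg => String.ofList
      (List.replicate (PySem.Str.count seg "O") 'O' ++ List.replicate (PySem.Str.count seg ".") '.'))
      ∘ String.ofList = fun seg : List Char => tiltSeg seg := by
    funext seg
    simp [tiltSeg, PySem.Str.count_eq, show ("O" : String).toList = ['O'] from rfl,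
      show ("." : String).toList = ['.'] from rfl, count_single]
  rw [hcomp, join_hash_mySplit row.toList []]
  simp
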